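-- pv_equiv track=rewrite | github.com/anasco119/Oiu-helper | main.py | parse_manual_anki_input
-- ===== SOURCE A (Python) =====
-- def parse_manual_anki_input(text):
--     cards = []
--     lines = [line.strip() for line in text.strip().split('\n')]
--     current_card = []
--
--     for line in lines:
--         if line == "":
--             if current_card:
--                 if len(current_card) >= 2:
--                     card = {
--                         "front": current_card[0],
--                         "back": current_card[1],
--                         "tag": current_card[2] if len(current_card) > 2 else ""
--                     }
--                     cards.append(card)
--                 current_card = []
--         else:
--             current_card.append(line)
--
--     if current_card and len(current_card) >= 2:
--         card = {
--             "front": current_card[0],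
--             "back": current_card[1],
--             "tag": current_card[2] if len(current_card) > 2 else ""
--         }
--         cards.append(card)
--
--     return cards
-- ===== SOURCE B (Python) =====
-- def _blocks(lines):
--     """Split into maximal runs of consecutive non-empty lines."""
--     if not lines:
--         return []
--     if lines[0] == "":
--         return _blocks(lines[1:])
--     k = 0
--     while k < len(lines) and lines[k] != "":
--         k += 1
--     return [lines[:k]] + _blocks(lines[k:])
--
-- def parse_manual_anki_input(text):
--     lines = [line.strip() for line in text.strip().split('\n')]
--     return [{"front": b[0], "back": b[1], "tag": b[2] if len(b) > 2 else ""}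
--             for b in _blocks(lines) if len(b) >= 2]
-- ===== Notes on version B (the rewrite author's own statement) =====
-- stated objective: alternative
-- what changed: Replaces A's single accumulator loop with its separate trailing-flush branch by a two-phase group-then-map: recursively split the stripped lines into maximal runs of non-empty lines, then build a card from each run of length >= 2 in one comprehension.
import Mathlib
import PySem

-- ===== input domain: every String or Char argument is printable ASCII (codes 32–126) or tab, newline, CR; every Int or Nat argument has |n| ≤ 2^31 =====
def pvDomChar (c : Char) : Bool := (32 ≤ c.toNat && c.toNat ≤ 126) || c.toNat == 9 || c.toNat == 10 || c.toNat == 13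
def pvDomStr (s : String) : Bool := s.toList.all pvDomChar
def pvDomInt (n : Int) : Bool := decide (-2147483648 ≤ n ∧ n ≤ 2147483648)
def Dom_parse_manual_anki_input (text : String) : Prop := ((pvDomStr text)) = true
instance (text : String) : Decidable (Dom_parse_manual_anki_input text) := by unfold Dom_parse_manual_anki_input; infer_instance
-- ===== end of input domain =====

-- B replaces A's accumulator loop with its separate trailing-flush branch by a two-phase
-- group-then-map decomposition (alternative structure, same cost; return value only).

-- ===== PORT A =====
-- the dict literal A builds (identically in both branches)
def pvCardA (cur : List String) : List (String × String) :=
  [("front", (PySem.List.pyGet? cur 0).getD ""),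
   ("back", (PySem.List.pyGet? cur 1).getD ""),
   ("tag", if 2 < cur.length then (PySem.List.pyGet? cur 2).getD "" else "")]

-- the body of A's for-loop, state = (cards, current_card)
def pvStepA (st : List (List (String × String)) × List String) (line : String) :
    List (List (String × String)) × List String :=
  if line = "" then
    if st.2 ≠ [] then
      (if 2 ≤ st.2.length then st.1 ++ [pvCardA st.2] else st.1, [])
    else st
  else (st.1, st.2 ++ [line])

def parse_manual_anki_input (text : String) : List (List (String × String)) :=
  let lines := ((PySem.Str.split? (PySem.Str.strip text) "\n").getD []).map PySem.Str.strip
  let st := lines.foldl pvStepA ([], [])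
  if st.2 ≠ [] ∧ 2 ≤ st.2.length then st.1 ++ [pvCardA st.2] else st.1

-- ===== PORT B =====
-- Source B `_blocks`: maximal runs of consecutive non-empty lines
def pvBlocks : List String → List (List String)
  | [] => []
  | l :: ls =>
    if l = "" then pvBlocks ls
    else (l :: ls.takeWhile (· ≠ "")) :: pvBlocks (ls.dropWhile (· ≠ ""))
termination_by ls => ls.length
decreasing_by
  · simp
  · exact Nat.lt_succ_of_le (List.length_dropWhile_le ..)

def parse_manual_anki_input_alt (text : String) : List (List (String × String)) :=
  let lines := ((PySem.Str.split? (PySem.Str.strip text) "\n").getD []).map PySem.Str.strip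
  ((pvBlocks lines).filter (fun b => decide (2 ≤ b.length))).map
    (fun b => [("front", (PySem.List.pyGet? b 0).getD ""),
               ("back", (PySem.List.pyGet? b 1).getD ""),
               ("tag", if 2 < b.length then (PySem.List.pyGet? b 2).getD "" else "")])

-- ===== PRECONDITION & SPEC =====
def Spec_parse_manual_anki_input (text : String) (out : List (List (String × String))) : Prop := out = parse_manual_anki_input_alt text
instance (text : String) (out : List (List (String × String))) : Decidable (Spec_parse_manual_anki_input text out) := by unfold Spec_parse_manual_anki_input; infer_instance

-- ===== CLAIM (what is proved, stated in full; the proofs are below) =====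
def Claim_equal_parse_manual_anki_input : Prop := ∀ (text : String), Dom_parse_manual_anki_input text → Spec_parse_manual_anki_input text (parse_manual_anki_input text)

-- ===== LEMMAS AND PROOFS =====

-- A's fold from an empty cards list, and A's final flush, as named functions
def pvFoldA (lines : List String) (cur : List String) :
    List (List (String × String)) × List String :=
  List.foldl pvStepA ([], cur) lines

def pvFlushA (st : List (List (String × String)) × List String) :
    List (List (String × String)) :=
  if st.2 ≠ [] ∧ 2 ≤ st.2.length then st.1 ++ [pvCardA st.2] else st.1

theorem pvStepA_split (line : String) (cards : List (List (String × String)))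
    (cur : List String) :
    pvStepA (cards, cur) line =
      (cards ++ (pvStepA ([], cur) line).1, (pvStepA ([], cur) line).2) := by
  unfold pvStepA
  split_ifs <;> simp_all

theorem pvFoldA_shift (lines : List String) (cards : List (List (String × String)))
    (cur : List String) :
    List.foldl pvStepA (cards, cur) lines =
      (cards ++ (pvFoldA lines cur).1, (pvFoldA lines cur).2) := by
  induction lines generalizing cards cur with
  | nil => simp [pvFoldA]
  | cons l ls ih =>
    simp only [List.foldl_cons]
    rw [pvStepA_split l cards cur, ih]
    conv_rhs => rw [pvFoldA]
    simp only [List.foldl_cons]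
    rw [← Prod.mk.eta (p := pvStepA ([], cur) l), ih]
    simp [List.append_assoc, pvFoldA]

theorem pvFoldA_nonblank (t : List String) (h : ∀ x ∈ t, x ≠ "") :
    ∀ (rest cur : List String), pvFoldA (t ++ rest) cur = pvFoldA rest (cur ++ t) := by
  induction t with
  | nil => intro rest cur; simp
  | cons x xs ih =>
    intro rest cur
    have hx : x ≠ "" := h x (by simp)
    have hstep : pvStepA ([], cur) x = ([], cur ++ [x]) := by simp [pvStepA, hx]
    simp only [List.cons_append, pvFoldA, List.foldl_cons, hstep]
    have := ih (fun y hy => h y (by simp [hy])) rest (cur ++ [x])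
    simpa [pvFoldA, List.append_assoc] using this

theorem pvFlushA_shift (c : List (List (String × String)))
    (st : List (List (String × String)) × List String) :
    pvFlushA (c ++ st.1, st.2) = c ++ pvFlushA st := by
  unfold pvFlushA
  split_ifs <;> simp_all

theorem pvFoldA_eq_blocks (lines : List String) :
    pvFlushA (pvFoldA lines []) =
      ((pvBlocks lines).filter (fun b => decide (2 ≤ b.length))).map pvCardA := by
  induction lines using pvBlocks.induct with
  | case1 => simp [pvFoldA, pvFlushA, pvBlocks]
  | case2 ls ih =>
    have hstep : pvStepA ([], []) "" = ([], []) := by simp [pvStepA]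
    have hB : pvBlocks ("" :: ls) = pvBlocks ls := by simp only [pvBlocks]; simp
    rw [hB, ← ih]
    simp only [pvFoldA, List.foldl_cons, hstep]
  | case3 l ls hl ih =>
    have hsplit : ls.takeWhile (· ≠ "") ++ ls.dropWhile (· ≠ "") = ls :=
      List.takeWhile_append_dropWhile
    have htne : ∀ x ∈ ls.takeWhile (· ≠ ""), x ≠ "" := by
      intro x hx; simpa using List.mem_takeWhile_imp hx
    have hstep : pvStepA ([], []) l = ([], [l]) := by simp [pvStepA, hl]
    have hB : pvBlocks (l :: ls) =
        (l :: ls.takeWhile (· ≠ "")) :: pvBlocks (ls.dropWhile (· ≠ "")) := by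
      simp only [pvBlocks]; simp [hl]
    have h1 : pvFoldA (l :: ls) [] =
        pvFoldA (ls.dropWhile (· ≠ "")) (l :: ls.takeWhile (· ≠ "")) := by
      conv_lhs => rw [pvFoldA]
      rw [List.foldl_cons, hstep, ← hsplit]
      have := pvFoldA_nonblank _ htne (ls.dropWhile (· ≠ "")) [l]
      simpa [pvFoldA, hsplit] using this
    rw [h1, hB]
    cases hdd : ls.dropWhile (· ≠ "") with
    | nil =>
      simp only [pvFoldA, List.foldl_nil, pvFlushA, pvBlocks, List.filter_cons]
      rcases Nat.lt_or_ge (l :: ls.takeWhile (· ≠ "")).length 2 with hlen | hlen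
      · have hneg : ¬ 2 ≤ (l :: ls.takeWhile (· ≠ "")).length := by omega
        rw [if_neg (fun h => absurd h.2 hneg), if_neg (by simpa using hneg)]
        simp
      · rw [if_pos ⟨List.cons_ne_nil _ _, hlen⟩, if_pos (by simpa using hlen)]
        simp
    | cons x d' =>
      have hx : x = "" := by
        have hne : ls.dropWhile (· ≠ "") ≠ [] := by rw [hdd]; exact List.cons_ne_nil x d'
        have := List.head_dropWhile_not (p := (· ≠ "")) (l := ls) hne
        simp only [hdd, List.head_cons, decide_eq_false_iff_not, not_not] at this
        exact this
      subst hx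
      -- the pending block is flushed by the blank separator
      have hF : pvStepA ([], l :: ls.takeWhile (· ≠ "")) "" =
          ((if 2 ≤ (l :: ls.takeWhile (· ≠ "")).length
              then [pvCardA (l :: ls.takeWhile (· ≠ ""))] else []), []) := by
        simp [pvStepA]
      have h2 : pvFoldA ("" :: d') (l :: ls.takeWhile (· ≠ "")) =
          ((if 2 ≤ (l :: ls.takeWhile (· ≠ "")).length
              then [pvCardA (l :: ls.takeWhile (· ≠ ""))] else []) ++ (pvFoldA d' []).1,
            (pvFoldA d' []).2) := by
      -- one blank step, then shift the already-emitted card out of the fold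
        rw [pvFoldA, List.foldl_cons, hF, pvFoldA_shift]
      -- the induction hypothesis, with the leading blank line skipped
      have hBskip : pvBlocks ("" :: d') = pvBlocks d' := by simp only [pvBlocks]; simp
      have ih' : pvFlushA (pvFoldA d' []) =
          ((pvBlocks d').filter (fun b => decide (2 ≤ b.length))).map pvCardA := by
        rw [hdd] at ih
        have hskip : pvFoldA ("" :: d') [] = pvFoldA d' [] := by
          simp [pvFoldA, pvStepA]
        rwa [hskip, hBskip] at ih
      rw [h2, pvFlushA_shift, ih', hBskip, List.filter_cons]
      rcases Nat.lt_or_ge (l :: ls.takeWhile (· ≠ "")).length 2 with hlen | hlen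
      · have hneg : ¬ 2 ≤ (l :: ls.takeWhile (· ≠ "")).length := by omega
        rw [if_neg hneg, if_neg (by simpa using hneg)]
        simp
      · rw [if_pos hlen, if_pos (by simpa using hlen)]
        simp

-- ===== VERDICT (by name: the statement is the Claim_ definition above) =====
theorem parse_manual_anki_input_spec : Claim_equal_parse_manual_anki_input := by
  intro text _
  unfold Spec_parse_manual_anki_input parse_manual_anki_input parse_manual_anki_input_alt
  exact pvFoldA_eq_blocks
    (((PySem.Str.split? (PySem.Str.strip text) "\n").getD []).map PySem.Str.strip)
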